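-- pv_equiv track=rewrite | github.com/kakdeykaushik/cses.fi | Apartments/main.py | solve
-- ===== SOURCE A (Python) =====
-- def match(applicant, aprtment, margin):
--     return abs(applicant - aprtment) <= margin
--
-- def solve(applicants: list, aprtments: list, margin):
--     applicants.sort()
--     aprtments.sort()
--
--     ans = 0
--     i = j = 0
--     while i < len(applicants) and j < len(aprtments):
--         if match(applicants[i], aprtments[j], margin):
--            i += 1
--            j += 1
--            ans += 1
--         else:
--             if aprtments[j] < applicants[i]:
--                 j += 1
--             else:
--                 i += 1
--
--     return ans
-- ===== SOURCE B (Python) =====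
-- def solve(applicants: list, aprtments: list, margin):
--     applicants.sort()
--     aprtments.sort()
--
--     # Single ascending sweep over all values at once: tag each value with its
--     # kind (0 = applicant, 1 = apartment), sort the combined event list, and
--     # keep one waiting queue holding the not-yet-matched values of one kind.
--     events = [(v, 0) for v in applicants] + [(v, 1) for v in aprtments]
--     events.sort()
--
--     ans = 0
--     kind = 0   # the kind currently waiting in q
--     q = []     # waiting values of that kind, oldest first
--     h = 0      # head of the live part of q
--     for v, t in events:
--         if t == kind:
--             q.append(v)
--         else:
--             while h < len(q) and q[h] < v - margin:
--                 h += 1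
--             if h < len(q):
--                 ans += 1
--                 h += 1
--             else:
--                 q = [v]
--                 h = 0
--                 kind = t
--     return ans
-- ===== Notes on version B (the rewrite author's own statement) =====
-- stated objective: alternative
-- what changed: Replaces A's two-pointer merge over the two sorted lists with a single ascending sweep over one combined tagged event list (applicants and apartments sorted together), maintaining one waiting queue of unmatched values of one kind that is lazily expired and matched as events of the other kind arrive.
import Mathlib
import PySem

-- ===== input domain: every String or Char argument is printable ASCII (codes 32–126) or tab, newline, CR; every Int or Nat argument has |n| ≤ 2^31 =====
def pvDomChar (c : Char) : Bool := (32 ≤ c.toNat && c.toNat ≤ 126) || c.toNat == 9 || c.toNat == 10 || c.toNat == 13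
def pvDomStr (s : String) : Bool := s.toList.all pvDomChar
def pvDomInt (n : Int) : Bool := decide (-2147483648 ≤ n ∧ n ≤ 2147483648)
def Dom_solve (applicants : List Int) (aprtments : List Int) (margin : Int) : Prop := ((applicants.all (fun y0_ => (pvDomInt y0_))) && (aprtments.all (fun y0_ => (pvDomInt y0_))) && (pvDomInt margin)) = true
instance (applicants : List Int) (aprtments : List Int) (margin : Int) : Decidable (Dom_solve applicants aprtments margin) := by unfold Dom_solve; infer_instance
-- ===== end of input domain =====

-- B replaces A's two-pointer merge of the two sorted lists by a single ascending sweep over one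
-- combined tagged event list with a lazily-expired waiting queue (alternative decomposition, same
-- cost). Equivalence is about the RETURN value; both Pythons sort both list arguments in place.

-- ===== PORT A =====
-- match(applicant, aprtment, margin)
def matchA (applicant : Int) (aprtment : Int) (margin : Int) : Bool :=
  |applicant - aprtment| ≤ margin

-- A's while loop over indices i, j, transliterated as recursion over the two suffixes
def mergeA (margin : Int) : List Int → List Int → Int
  | a :: as, b :: bs =>
      if matchA a b margin then 1 + mergeA margin as bs
      else if b < a then mergeA margin (a :: as) bs
      else mergeA margin as (b :: bs)
  | _, _ => 0
  termination_by as bs => as.length + bs.length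

def solve (applicants : List Int) (aprtments : List Int) (margin : Int) : Int :=
  mergeA margin (PySem.List.sorted applicants (fun x => x) false)
                (PySem.List.sorted aprtments (fun x => x) false)

-- ===== PORT B =====
-- the inner 'while h < len(q) and q[h] < v - margin: h += 1'
def skipB (margin : Int) (v : Int) (q : List Int) (h : Int) : Int :=
  if h < (q.length : Int) ∧ PySem.List.pyGetD q h 0 < v - margin then
    skipB margin v q (h + 1)
  else h
  termination_by ((q.length : Int) - h).toNat
  decreasing_by omega

-- one step of the 'for v, t in events' loop; state = (ans, kind, q, h)
def stepB (margin : Int) (st : Int × Int × List Int × Int) (e : Int × Int) :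
    Int × Int × List Int × Int :=
  if e.2 = st.2.1 then (st.1, st.2.1, st.2.2.1 ++ [e.1], st.2.2.2)
  else
    let h' := skipB margin e.1 st.2.2.1 st.2.2.2
    if h' < (st.2.2.1.length : Int) then (st.1 + 1, st.2.1, st.2.2.1, h' + 1)
    else (st.1, e.2, [e.1], 0)

def solve_alt (applicants : List Int) (aprtments : List Int) (margin : Int) : Int :=
  let sa := PySem.List.sorted applicants (fun x => x) false
  let sb := PySem.List.sorted aprtments (fun x => x) false
  let events := sa.map (fun v => (v, (0 : Int))) ++ sb.map (fun v => (v, (1 : Int)))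
  let es := PySem.List.sorted events (fun p => p.1) false
  (es.foldl (stepB margin) (0, 0, [], 0)).1

-- ===== PRECONDITION & SPEC =====
def Spec_solve (applicants : List Int) (aprtments : List Int) (margin : Int) (out : Int) : Prop := out = solve_alt applicants aprtments margin
instance (applicants : List Int) (aprtments : List Int) (margin : Int) (out : Int) : Decidable (Spec_solve applicants aprtments margin out) := by unfold Spec_solve; infer_instance

-- ===== CLAIM (what is proved, stated in full; the proofs are below) =====
def Claim_equal_solve : Prop := ∀ (applicants : List Int) (aprtments : List Int) (margin : Int), Dom_solve applicants aprtments margin → Spec_solve applicants aprtments margin (solve applicants aprtments margin)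

-- ===== LEMMAS AND PROOFS =====

-- proof-side clean sweep: the queue is carried as its live suffix, expiry is dropWhile
def scanC (margin : Int) : List (Int × Int) → Int → List Int → Int
  | [], _, _ => 0
  | e :: E, kind, q =>
      if e.2 = kind then scanC margin E kind (q ++ [e.1])
      else
        if q.dropWhile (fun x => decide (x < e.1 - margin)) = [] then
          scanC margin E e.2 [e.1]
        else
          1 + scanC margin E kind (q.dropWhile (fun x => decide (x < e.1 - margin))).tail

def projT (t : Int) (E : List (Int × Int)) : List Int :=
  (E.filter (fun e => e.2 = t)).map Prod.fst

-- basic mergeA facts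
lemma mergeA_nil_right (margin : Int) (as : List Int) : mergeA margin as [] = 0 := by
  cases as <;> rw [mergeA.eq_def]

lemma mergeA_nil_left (margin : Int) (bs : List Int) : mergeA margin [] bs = 0 := by
  cases bs <;> rw [mergeA.eq_def]

lemma mergeA_neg (margin : Int) (hm : margin < 0) :
    ∀ as bs : List Int, mergeA margin as bs = 0 := by
  intro as bs
  fun_induction mergeA margin as bs with
  | case1 a as b bs hmt ih =>
      exfalso
      simp [matchA] at hmt
      have : (0 : Int) ≤ |a - b| := abs_nonneg _
      omega
  | case2 a as b bs hmt hlt ih => simpa [mergeA, hmt, hlt] using ih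
  | case3 a as b bs hmt hlt ih => simpa [mergeA, hmt, hlt] using ih
  | case4 as bs h => cases as <;> cases bs <;> simp_all

lemma dropWhile_head_false {p : Int → Bool} {l : List Int} {b : Int} {rest : List Int}
    (h : l.dropWhile p = b :: rest) : p b = false := by
  induction l with
  | nil => simp at h
  | cons x xs ih =>
    by_cases hx : p x
    · simp [hx] at h; exact ih h
    · simp [hx] at h
      rcases h with ⟨rfl, _⟩
      simpa using hx

-- expiry on A's side, applicant queue: too-low applicants in front are discarded one by one
lemma mergeA_drop_applicants (margin : Int) (b0 : Int) (bs rest : List Int) :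
    ∀ dropped : List Int, (∀ x ∈ dropped, x < b0 - margin ∧ x ≤ b0) →
      mergeA margin (dropped ++ rest) (b0 :: bs) = mergeA margin rest (b0 :: bs) := by
  intro dropped
  induction dropped with
  | nil => intro _; rfl
  | cons x xs ih =>
    intro hx
    obtain ⟨h1, h2⟩ := hx x (by simp)
    have hm : matchA x b0 margin = false := by
      simp only [matchA]
      have : |x - b0| = b0 - x := by
        rw [abs_sub_comm]; exact abs_of_nonneg (by omega)
      simp only [this]
      simp only [decide_eq_false_iff_not, not_le]
      omega
    have hlt : ¬ b0 < x := by omega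
    simp only [List.cons_append, mergeA, hm, Bool.false_eq_true, if_false, hlt]
    exact ih (fun y hy => hx y (by simp [hy]))

-- expiry on A's side, apartment queue (needs 0 ≤ margin)
lemma mergeA_drop_apartments (margin : Int) (hm0 : 0 ≤ margin) (v : Int) (as rest : List Int) :
    ∀ dropped : List Int, (∀ x ∈ dropped, x < v - margin ∧ x ≤ v) →
      mergeA margin (v :: as) (dropped ++ rest) = mergeA margin (v :: as) rest := by
  intro dropped
  induction dropped with
  | nil => intro _; rfl
  | cons x xs ih =>
    intro hx
    obtain ⟨h1, h2⟩ := hx x (by simp)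
    have hm : matchA v x margin = false := by
      simp only [matchA]
      have : |v - x| = v - x := abs_of_nonneg (by omega)
      simp only [this]
      simp only [decide_eq_false_iff_not, not_le]
      omega
    have hlt : x < v := by omega
    simp only [List.cons_append, mergeA, hm, Bool.false_eq_true, if_false, hlt, if_true]
    exact ih (fun y hy => hx y (by simp [hy]))

lemma mem_dropWhile_mem {p : Int → Bool} {l : List Int} {x : Int}
    (h : x ∈ l.dropWhile p) : x ∈ l :=
  (List.dropWhile_sublist p).subset h

lemma mem_takeWhile_facts {p : Int → Bool} {l : List Int} {x : Int}
    (h : x ∈ l.takeWhile p) : p x = true ∧ x ∈ l :=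
  ⟨List.mem_takeWhile_imp h, (List.takeWhile_sublist p).subset h⟩

lemma mergeA_cons_match (margin a b : Int) (as bs : List Int) (h : matchA a b margin = true) :
    mergeA margin (a :: as) (b :: bs) = 1 + mergeA margin as bs := by
  rw [mergeA.eq_def]; simp [h]

-- the bisimulation: a sorted tagged event stream with one waiting queue computes mergeA
lemma scanC_eq_mergeA (margin : Int) (hm0 : 0 ≤ margin) :
    ∀ (E : List (Int × Int)) (q : List Int),
      (∀ e ∈ E, e.2 = 0 ∨ e.2 = 1) →
      E.Pairwise (fun e f => e.1 ≤ f.1) →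
      (∀ e ∈ E, ∀ x ∈ q, x ≤ e.1) →
      scanC margin E 0 q = mergeA margin (q ++ projT 0 E) (projT 1 E) ∧
      scanC margin E 1 q = mergeA margin (projT 0 E) (q ++ projT 1 E) := by
  intro E
  induction E with
  | nil =>
    intro q _ _ _
    constructor
    · simp [scanC, projT, mergeA_nil_right]
    · simp [scanC, projT, mergeA_nil_left]
  | cons e E ih =>
    obtain ⟨v, t⟩ := e
    intro q htags hpw hqle
    have htagsE : ∀ f ∈ E, f.2 = 0 ∨ f.2 = 1 := fun f hf => htags f (by simp [hf])
    have hpwE : E.Pairwise (fun e f => e.1 ≤ f.1) := hpw.of_cons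
    have hele : ∀ f ∈ E, v ≤ f.1 := by
      intro f hf; exact (List.pairwise_cons.mp hpw).1 f hf
    have hqleE : ∀ f ∈ E, ∀ x ∈ q, x ≤ f.1 := fun f hf => hqle f (by simp [hf])
    have hqe : ∀ x ∈ q, x ≤ v := hqle (v, t) (by simp)
    have hsplit := (List.takeWhile_append_dropWhile
      (p := fun x => decide (x < v - margin)) (l := q)).symm
    have hdropped : ∀ x ∈ q.takeWhile (fun x => decide (x < v - margin)),
        x < v - margin ∧ x ≤ v := by
      intro x hx
      obtain ⟨h1, h2⟩ := mem_takeWhile_facts hx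
      simp at h1
      exact ⟨h1, hqe x h2⟩
    have henq : ∀ f ∈ E, ∀ x ∈ q ++ [v], x ≤ f.1 := by
      intro f hf x hx
      rcases List.mem_append.mp hx with hx | hx
      · exact hqleE f hf x hx
      · simp at hx; subst hx; exact hele f hf
    have hnew : ∀ f ∈ E, ∀ x ∈ [v], x ≤ f.1 := by
      intro f hf x hx; simp at hx; subst hx; exact hele f hf
    rcases htags (v, t) (by simp) with ht | ht <;> simp only at ht <;> subst ht
    · -- (v, 0) : an applicant event
      have hp0 : projT 0 ((v, 0) :: E) = v :: projT 0 E := by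
        simp [projT]
      have hp1 : projT 1 ((v, 0) :: E) = projT 1 E := by
        simp [projT]
      constructor
      · -- queue kind 0 : enqueue
        have hih := (ih (q ++ [v]) htagsE hpwE henq).1
        simp only [scanC, if_true, hih, hp0, hp1, List.append_assoc, List.singleton_append]
      · -- queue kind 1 : applicant against the apartment queue
        rw [hp0, hp1]
        rcases hdw : q.dropWhile (fun x => decide (x < v - margin)) with _ | ⟨k0, qt⟩
        · -- queue exhausted: switch to applicant queue [v]
          have hqform : q = q.takeWhile (fun x => decide (x < v - margin)) := by
            conv_lhs => rw [hsplit]; rw [hdw]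
            simp
          have hih := (ih [v] htagsE hpwE hnew).1
          simp only [scanC]
          rw [if_neg (by norm_num), if_pos hdw, hih]
          conv_rhs => rw [hqform]
          rw [show ([v] ++ projT 0 E) = v :: projT 0 E by simp] at hih ⊢
          exact (mergeA_drop_apartments margin hm0 v (projT 0 E) (projT 1 E) _ hdropped).symm
        · -- match v with the queue front k0
          have hk0q : k0 ∈ q := mem_dropWhile_mem (by rw [hdw]; simp)
          have hk0ge : ¬ (k0 < v - margin) := by
            have := dropWhile_head_false hdw; simpa using this
          have hk0le : k0 ≤ v := hqe k0 hk0q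
          have hmt : matchA v k0 margin = true := by
            simp only [matchA]
            rw [abs_of_nonneg (by omega)]
            simp; omega
          have hq' : ∀ f ∈ E, ∀ x ∈ qt, x ≤ f.1 := by
            intro f hf x hx
            exact hqleE f hf x (mem_dropWhile_mem (by rw [hdw]; simp [hx]))
          have hih := (ih qt htagsE hpwE hq').2
          simp only [scanC]
          rw [if_neg (by norm_num), if_neg (by rw [hdw]; simp), hdw]
          simp only [List.tail_cons, hih]
          conv_rhs => rw [hsplit]; rw [hdw]
          rw [List.append_assoc,
            mergeA_drop_apartments margin hm0 v (projT 0 E)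
              ((k0 :: qt) ++ projT 1 E) _ hdropped]
          rw [show ((k0 :: qt) ++ projT 1 E) = k0 :: (qt ++ projT 1 E) by simp]
          rw [mergeA_cons_match margin v k0 _ _ hmt]
    · -- (v, 1) : an apartment event
      have hp0 : projT 0 ((v, 1) :: E) = projT 0 E := by
        simp [projT]
      have hp1 : projT 1 ((v, 1) :: E) = v :: projT 1 E := by
        simp [projT]
      constructor
      · -- queue kind 0 : apartment against the applicant queue
        rw [hp0, hp1]
        rcases hdw : q.dropWhile (fun x => decide (x < v - margin)) with _ | ⟨k0, qt⟩
        · have hqform : q = q.takeWhile (fun x => decide (x < v - margin)) := by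
            conv_lhs => rw [hsplit]; rw [hdw]
            simp
          have hih := (ih [v] htagsE hpwE hnew).2
          simp only [scanC]
          rw [if_neg (by norm_num), if_pos hdw, hih]
          conv_rhs => rw [hqform]
          rw [show ([v] ++ projT 1 E) = v :: projT 1 E by simp] at hih ⊢
          exact (mergeA_drop_applicants margin v (projT 1 E) (projT 0 E) _ hdropped).symm
        · have hk0q : k0 ∈ q := mem_dropWhile_mem (by rw [hdw]; simp)
          have hk0ge : ¬ (k0 < v - margin) := by
            have := dropWhile_head_false hdw; simpa using this
          have hk0le : k0 ≤ v := hqe k0 hk0q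
          have hmt : matchA k0 v margin = true := by
            simp only [matchA]
            rw [abs_sub_comm, abs_of_nonneg (by omega)]
            simp; omega
          have hq' : ∀ f ∈ E, ∀ x ∈ qt, x ≤ f.1 := by
            intro f hf x hx
            exact hqleE f hf x (mem_dropWhile_mem (by rw [hdw]; simp [hx]))
          have hih := (ih qt htagsE hpwE hq').1
          simp only [scanC]
          rw [if_neg (by norm_num), if_neg (by rw [hdw]; simp), hdw]
          simp only [List.tail_cons, hih]
          conv_rhs => rw [hsplit]; rw [hdw]
          rw [List.append_assoc,
            mergeA_drop_applicants margin v (projT 1 E)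
              ((k0 :: qt) ++ projT 0 E) _ hdropped]
          rw [show ((k0 :: qt) ++ projT 0 E) = k0 :: (qt ++ projT 0 E) by simp]
          rw [mergeA_cons_match margin k0 v _ _ hmt]
      · -- queue kind 1 : enqueue
        have hih := (ih (q ++ [v]) htagsE hpwE henq).2
        simp only [scanC, if_true, hih, hp0, hp1, List.append_assoc, List.singleton_append]

-- scanC is 0 for negative margin
lemma scanC_neg (margin : Int) (hm : margin < 0) :
    ∀ (E : List (Int × Int)) (kind : Int) (q : List Int),
      E.Pairwise (fun e f => e.1 ≤ f.1) →
      (∀ e ∈ E, ∀ x ∈ q, x ≤ e.1) →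
      scanC margin E kind q = 0 := by
  intro E
  induction E with
  | nil => intro kind q _ _; rfl
  | cons e E ih =>
    obtain ⟨v, t⟩ := e
    intro kind q hpw hqle
    have hpwE : E.Pairwise (fun e f => e.1 ≤ f.1) := hpw.of_cons
    have hele : ∀ f ∈ E, v ≤ f.1 := by
      intro f hf; exact (List.pairwise_cons.mp hpw).1 f hf
    have hqleE : ∀ f ∈ E, ∀ x ∈ q, x ≤ f.1 := fun f hf => hqle f (by simp [hf])
    have hqe : ∀ x ∈ q, x ≤ v := hqle (v, t) (by simp)
    have henq : ∀ f ∈ E, ∀ x ∈ q ++ [v], x ≤ f.1 := by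
      intro f hf x hx
      rcases List.mem_append.mp hx with hx | hx
      · exact hqleE f hf x hx
      · simp at hx; subst hx; exact hele f hf
    have hnew : ∀ f ∈ E, ∀ x ∈ [v], x ≤ f.1 := by
      intro f hf x hx; simp at hx; subst hx; exact hele f hf
    by_cases hk : (v, t).2 = kind
    · simp only [scanC, if_pos hk]
      exact ih kind (q ++ [v]) hpwE henq
    · have hdw : q.dropWhile (fun x => decide (x < v - margin)) = [] := by
        rw [List.dropWhile_eq_nil_iff]
        intro x hx
        have := hqe x hx
        simp; omega
      simp only [scanC, if_neg hk, if_pos hdw]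
      exact ih t [v] hpwE hnew

lemma dropWhile_eq_drop_takeWhile (p : Int → Bool) (l : List Int) :
    l.dropWhile p = l.drop (l.takeWhile p).length := by
  induction l with
  | nil => rfl
  | cons x xs ih => by_cases hx : p x <;> simp [hx, ih]

-- skipB computes: it advances h past exactly the expired prefix of the live suffix
lemma skipB_spec (margin v : Int) (q : List Int) :
    ∀ (n : Nat) (h : Int), 0 ≤ h → h ≤ (q.length : Int) → ((q.length : Int) - h).toNat = n →
      skipB margin v q h
        = h + (((q.drop h.toNat).takeWhile (fun x => decide (x < v - margin))).length : Int) := by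
  intro n
  induction n with
  | zero =>
    intro h h0 hle hn
    have : h = (q.length : Int) := by omega
    subst this
    have hdrop : q.drop ((q.length : Int)).toNat = [] := by simp
    rw [skipB]
    rw [if_neg (by simp), hdrop]
    simp
  | succ n ihn =>
    intro h h0 hle hn
    have hlt : h < (q.length : Int) := by omega
    have hnat : h.toNat < q.length := by omega
    have hdrop : q.drop h.toNat = q[h.toNat] :: q.drop (h.toNat + 1) :=
      List.drop_eq_getElem_cons hnat
    by_cases hc : PySem.List.pyGetD q h 0 < v - margin
    · have hget : PySem.List.pyGetD q h 0 = q[h.toNat] :=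
        PySem.List.pyGetD_eq_getElem q 0 h0 hlt
      have hrec := ihn (h + 1) (by omega) (by omega) (by omega)
      rw [skipB, if_pos ⟨hlt, hc⟩, hrec, hdrop]
      have h1 : (h + 1).toNat = h.toNat + 1 := by omega
      rw [h1]
      rw [List.takeWhile_cons_of_pos (by simp; omega)]
      simp
      omega
    · have hget : PySem.List.pyGetD q h 0 = q[h.toNat] :=
        PySem.List.pyGetD_eq_getElem q 0 h0 hlt
      rw [skipB, if_neg (by rintro ⟨_, hx⟩; exact hc hx), hdrop]
      rw [List.takeWhile_cons_of_neg (by simp; omega)]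
      simp

-- the pointer fold equals the clean sweep
lemma foldl_stepB_eq_scanC (margin : Int) :
    ∀ (E : List (Int × Int)) (ans kind : Int) (q : List Int) (h : Int),
      0 ≤ h → h ≤ (q.length : Int) →
      (E.foldl (stepB margin) (ans, kind, q, h)).1
        = ans + scanC margin E kind (q.drop h.toNat) := by
  intro E
  induction E with
  | nil => intro ans kind q h _ _; simp [scanC]
  | cons e E ih =>
    intro ans kind q h h0 hle
    by_cases hk : e.2 = kind
    · -- same kind: enqueue
      have hstep : stepB margin (ans, kind, q, h) e = (ans, kind, q ++ [e.1], h) := by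
        simp [stepB, hk]
      rw [List.foldl_cons, hstep,
        ih ans kind (q ++ [e.1]) h h0 (by simp; omega)]
      have : (q ++ [e.1]).drop h.toNat = q.drop h.toNat ++ [e.1] :=
        List.drop_append_of_le_length (by omega)
      rw [this]
      simp [scanC, hk]
    · -- opposite kind
      have hsp := skipB_spec margin e.1 q (((q.length : Int) - h).toNat) h h0 hle rfl
      set s := q.drop h.toNat with hs
      set tw := s.takeWhile (fun x => decide (x < e.1 - margin)) with htw
      have hslen : (s.length : Int) = (q.length : Int) - h := by
        simp [hs]; omega
      have htwle : tw.length ≤ s.length := by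
        rw [htw]; exact (List.takeWhile_sublist _).length_le
      have hdwdrop : s.dropWhile (fun x => decide (x < e.1 - margin)) = s.drop tw.length :=
        dropWhile_eq_drop_takeWhile _ s
      have hh' : skipB margin e.1 q h = h + (tw.length : Int) := hsp
      by_cases hlt : h + (tw.length : Int) < (q.length : Int)
      · -- a live element survives: match it
        have hstep : stepB margin (ans, kind, q, h) e
            = (ans + 1, kind, q, h + (tw.length : Int) + 1) := by
          simp only [stepB, if_neg hk, hh']
          rw [if_pos hlt]
        have hdw_ne : s.dropWhile (fun x => decide (x < e.1 - margin)) ≠ [] := by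
          rw [hdwdrop]
          simp only [ne_eq, List.drop_eq_nil_iff]
          omega
        have hdrop' : q.drop (h + (tw.length : Int) + 1).toNat
            = (s.dropWhile (fun x => decide (x < e.1 - margin))).tail := by
          rw [hdwdrop, List.tail_drop]
          have h2 : (h + (tw.length : Int) + 1).toNat = h.toNat + (tw.length + 1) := by omega
          rw [h2, hs, List.drop_drop]
        rw [List.foldl_cons, hstep,
          ih (ans + 1) kind q (h + (tw.length : Int) + 1) (by omega) (by omega), hdrop']
        simp only [scanC, if_neg hk, if_neg hdw_ne]
        omega
      · -- queue exhausted: restart it with this event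
        have hstep : stepB margin (ans, kind, q, h) e = (ans, e.2, [e.1], 0) := by
          simp only [stepB, if_neg hk, hh']
          rw [if_neg hlt]
        have hdw_nil : s.dropWhile (fun x => decide (x < e.1 - margin)) = [] := by
          rw [hdwdrop]
          simp only [List.drop_eq_nil_iff]
          omega
        rw [List.foldl_cons, hstep,
          ih ans e.2 [e.1] 0 (by omega) (by simp)]
        simp only [scanC, if_neg hk, if_pos hdw_nil]
        simp

-- assembly: the projections of the sorted tagged event list are the two sorted inputs
lemma projT_sorted_events (applicants aprtments : List Int) :
    projT 0 (PySem.List.sorted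
        ((PySem.List.sorted applicants (fun x => x) false).map (fun v => (v, (0 : Int)))
          ++ (PySem.List.sorted aprtments (fun x => x) false).map (fun v => (v, (1 : Int))))
        (fun p => p.1) false)
      = PySem.List.sorted applicants (fun x => x) false ∧
    projT 1 (PySem.List.sorted
        ((PySem.List.sorted applicants (fun x => x) false).map (fun v => (v, (0 : Int)))
          ++ (PySem.List.sorted aprtments (fun x => x) false).map (fun v => (v, (1 : Int))))
        (fun p => p.1) false)
      = PySem.List.sorted aprtments (fun x => x) false := by
  set sa := PySem.List.sorted applicants (fun x => x) false with hsa
  set sb := PySem.List.sorted aprtments (fun x => x) false with hsb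
  set ev := sa.map (fun v => (v, (0 : Int))) ++ sb.map (fun v => (v, (1 : Int))) with hev
  set E := PySem.List.sorted ev (fun p => p.1) false with hE
  have hperm : E.Perm ev := PySem.List.sorted_perm ev (fun p => p.1) false
  have hpw : E.Pairwise (fun a b => a.1 ≤ b.1) :=
    PySem.List.sorted_pairwise ev (fun p => p.1)
  have hsapw : sa.Pairwise (· ≤ ·) := PySem.List.sorted_pairwise applicants (fun x => x)
  have hsbpw : sb.Pairwise (· ≤ ·) := PySem.List.sorted_pairwise aprtments (fun x => x)
  constructor
  · have hp : (projT 0 E).Perm sa := by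
      have h1 : (E.filter (fun e => e.2 = 0)).Perm (ev.filter (fun e => e.2 = 0)) :=
        hperm.filter _
      have h2 : ev.filter (fun e => e.2 = 0) = sa.map (fun v => (v, (0 : Int))) := by
        rw [hev]
        rw [List.filter_append]
        simp [List.filter_map, Function.comp_def]
      have := h1.map Prod.fst
      rw [h2] at this
      simpa [projT, List.map_map, Function.comp_def] using this
    have hs : (projT 0 E).Pairwise (· ≤ ·) := by
      have h1 : (E.filter (fun e => e.2 = 0)).Pairwise (fun a b => a.1 ≤ b.1) :=
        hpw.sublist List.filter_sublist
      simpa [projT, List.pairwise_map] using h1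
    exact hp.eq_of_pairwise (by intro a b _ _ hab hba; omega) hs hsapw
  · have hp : (projT 1 E).Perm sb := by
      have h1 : (E.filter (fun e => e.2 = 1)).Perm (ev.filter (fun e => e.2 = 1)) :=
        hperm.filter _
      have h2 : ev.filter (fun e => e.2 = 1) = sb.map (fun v => (v, (1 : Int))) := by
        rw [hev]
        rw [List.filter_append]
        simp [List.filter_map, Function.comp_def]
      have := h1.map Prod.fst
      rw [h2] at this
      simpa [projT, List.map_map, Function.comp_def] using this
    have hs : (projT 1 E).Pairwise (· ≤ ·) := by
      have h1 : (E.filter (fun e => e.2 = 1)).Pairwise (fun a b => a.1 ≤ b.1) :=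
        hpw.sublist List.filter_sublist
      simpa [projT, List.pairwise_map] using h1
    exact hp.eq_of_pairwise (by intro a b _ _ hab hba; omega) hs hsbpw

-- ===== VERDICT (by name: the statement is the Claim_ definition above) =====
theorem solve_spec : Claim_equal_solve := by
  intro applicants aprtments margin _
  unfold Spec_solve solve solve_alt
  set sa := PySem.List.sorted applicants (fun x => x) false with hsa
  set sb := PySem.List.sorted aprtments (fun x => x) false with hsb
  set ev := sa.map (fun v => (v, (0 : Int))) ++ sb.map (fun v => (v, (1 : Int))) with hev
  set E := PySem.List.sorted ev (fun p => p.1) false with hE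
  have hfold : (E.foldl (stepB margin) (0, 0, [], 0)).1 = scanC margin E 0 [] := by
    have := foldl_stepB_eq_scanC margin E 0 0 [] 0 (by omega) (by simp)
    simpa using this
  have hpw : E.Pairwise (fun a b => a.1 ≤ b.1) :=
    PySem.List.sorted_pairwise ev (fun p => p.1)
  have htags : ∀ e ∈ E, e.2 = 0 ∨ e.2 = 1 := by
    intro e he
    have : e ∈ ev := by
      have := PySem.List.mem_sorted (xs := ev) (key := fun p => p.1) (rev := false) (x := e)
      exact this.mp he
    rcases List.mem_append.mp this with h | h <;>
      rcases List.mem_map.mp h with ⟨v, _, rfl⟩ <;> simp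
  obtain ⟨hp0, hp1⟩ := projT_sorted_events applicants aprtments
  rw [hfold]
  rcases lt_or_ge margin 0 with hm | hm
  · rw [scanC_neg margin hm E 0 [] hpw (by intro e he x hx; simp at hx),
      mergeA_neg margin hm]
  · have := (scanC_eq_mergeA margin hm E [] htags hpw (by intro e he x hx; simp at hx)).1
    rw [this]
    simp only [List.nil_append]
    rw [← hsa, ← hsb] at hp0 hp1
    rw [hp0, hp1]
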